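-- pv_equiv track=rewrite | github.com/Opensourcehack3rs/pwlist-algorithm | code/algorithm_data.py | string_filtering
-- ===== SOURCE A (Python) =====
-- def string_filtering(standard_info):
--     from copy import deepcopy
--     standard_info_copy = deepcopy(standard_info)
--     base_list_part = []
--     date_list = []
--     for key in standard_info_copy:
--         if standard_info_copy[key] == "none":
--             del standard_info[key]
--         else:
--             element = str(standard_info[key])
--             element = element.replace(".", "")
--             element = element.replace(" ", "")
--             element = element.replace("/", "")
--             if "day" in str(key):
--                 year = element[-2:]
--                 date = element[:-4]
--                 yeardate = date + year
--                 date_list.append(element)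
--                 date_list.append(year)
--                 date_list.append(date)
--                 date_list.append(yeardate)
--                 date_list.append(element[-4:])
--             base_list_part.append(element)
--     base_list = base_list_part + date_list
--     return base_list
-- ===== SOURCE B (Python) =====
-- def string_filtering(standard_info):
--     # drop the "none" entries (the same caller-visible deletions A performs)
--     for k in [k for k, v in standard_info.items() if v == "none"]:
--         del standard_info[k]
--
--     table = {ord(c): None for c in ". /"}
--
--     def go(items):
--         # recursion over the remaining items, returning the (base, dates) pair
--         if not items:
--             return [], []
--         (k, v), rest = items[0], items[1:]
--         base, dates = go(rest)
--         e = str(v).translate(table)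
--         if "day" in str(k):
--             head, tail = e[:-4], e[-4:]
--             year = tail[-2:]
--             dates = [e, year, head, head + year, tail] + dates
--         return [e] + base, dates
--
--     base, dates = go(list(standard_info.items()))
--     return base + dates
-- ===== Notes on version B (the rewrite author's own statement) =====
-- stated objective: alternative
-- what changed: A single loop that interleaves dict deletion, three chained str.replace calls and two growing accumulator lists becomes: one deletion pass, then a recursive back-to-front descent that returns the (base, dates) pair, cleaning each value with one translate deletion table and deriving the date parts from a head/tail split (the year taken from the 4-char tail) instead of A's direct slices.
import Mathlib
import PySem

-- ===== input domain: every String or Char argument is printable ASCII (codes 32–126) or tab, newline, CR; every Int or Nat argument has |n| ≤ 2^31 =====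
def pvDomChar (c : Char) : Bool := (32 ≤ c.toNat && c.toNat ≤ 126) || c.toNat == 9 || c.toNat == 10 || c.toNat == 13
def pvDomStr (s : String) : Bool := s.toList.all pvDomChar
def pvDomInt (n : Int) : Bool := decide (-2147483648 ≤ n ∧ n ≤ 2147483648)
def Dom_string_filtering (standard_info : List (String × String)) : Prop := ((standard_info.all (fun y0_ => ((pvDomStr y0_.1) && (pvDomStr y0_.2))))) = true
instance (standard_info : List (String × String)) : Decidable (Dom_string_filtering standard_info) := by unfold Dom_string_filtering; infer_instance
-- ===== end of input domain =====

-- B replaces A's single interleaved loop by a deletion pass followed by a recursive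
-- descent returning the (base, dates) pair, cleaning with one character-deletion pass.
-- Both A and B delete the "none" keys from the caller's dict in place; the equivalence
-- proved here is about the RETURN value.

-- ===== PORT A =====
def string_filtering (standard_info : List (String × String)) : List String :=
  -- standard_info_copy = deepcopy(standard_info)
  let copy : PySem.Dict String String := PySem.Dict.mk standard_info
  -- for key in standard_info_copy: …  (state: the mutated dict, base_list_part, date_list)
  let res := (PySem.Dict.keys copy).foldl
    (fun (st : PySem.Dict String String × List String × List String) key =>
      if PySem.Dict.getD copy key "" == "none" then
        (PySem.Dict.erase st.1 key, st.2.1, st.2.2)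
      else
        let element :=
          PySem.Str.replace (PySem.Str.replace (PySem.Str.replace
            (PySem.Dict.getD st.1 key "") "." "") " " "") "/" ""
        if PySem.Str.isIn "day" key then
          (st.1, st.2.1 ++ [element],
              st.2.2 ++ [element, PySem.Str.slice element (some (-2)) none,
                PySem.Str.slice element none (some (-4)),
                PySem.Str.join "" [PySem.Str.slice element none (some (-4)),
                  PySem.Str.slice element (some (-2)) none],
                PySem.Str.slice element (some (-4)) none])
        else
          (st.1, st.2.1 ++ [element], st.2.2))
    (PySem.Dict.mk standard_info, [], [])
  res.2.1 ++ res.2.2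

-- ===== PORT B =====
-- str.translate with a table mapping '.', ' ', '/' to None deletes exactly those
-- characters; ported exactly as a filter over the code points.
def pvBClean (s : String) : String :=
  String.ofList (s.toList.filter (fun c => !(c == '.' || c == ' ' || c == '/')))

def pvBDate (e : String) : List String :=
  let head := PySem.Str.slice e none (some (-4))
  let tail := PySem.Str.slice e (some (-4)) none
  let year := PySem.Str.slice tail (some (-2)) none
  [e, year, head, PySem.Str.join "" [head, year], tail]

def pvGo : List (String × String) → List String × List String
  | [] => ([], [])
  | (k, v) :: rest =>
    let r := pvGo rest
    let e := pvBClean v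
    (e :: r.1, if PySem.Str.isIn "day" k then pvBDate e ++ r.2 else r.2)

def string_filtering_alt (standard_info : List (String × String)) : List String :=
  let bad := (standard_info.filter (fun p => p.2 == "none")).map Prod.fst
  let remaining := bad.foldl (fun d k => PySem.Dict.erase d k) (PySem.Dict.mk standard_info)
  let r := pvGo remaining.items
  r.1 ++ r.2

-- ===== PRECONDITION & SPEC =====
-- Pre_ excludes association lists with duplicate keys: a Python dict cannot contain
-- them, so such lists do not represent any input A is ever called on.
def Pre_string_filtering (standard_info : List (String × String)) : Prop :=
  (standard_info.map Prod.fst).Nodup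
instance (standard_info : List (String × String)) : Decidable (Pre_string_filtering standard_info) := by unfold Pre_string_filtering; infer_instance

def pvWitness_string_filtering : (List (String × String)) :=
  [("day1", "1.2.2024"), ("x", "none"), ("y", "ab")]

def Spec_string_filtering (standard_info : List (String × String)) (out : List String) : Prop := out = string_filtering_alt standard_info
instance (standard_info : List (String × String)) (out : List String) : Decidable (Spec_string_filtering standard_info out) := by unfold Spec_string_filtering; infer_instance

-- ===== CLAIM (what is proved, stated in full; the proofs are below) =====
def Claim_equal_string_filtering : Prop := ∀ (standard_info : List (String × String)), Dom_string_filtering standard_info → Pre_string_filtering standard_info → Spec_string_filtering standard_info (string_filtering standard_info)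

-- ===== LEMMAS AND PROOFS =====

-- the cleaning function as A writes it (proof-side only)
def pvClean (s : String) : String :=
  PySem.Str.replace (PySem.Str.replace (PySem.Str.replace s "." "") " " "") "/" ""

-- the five date strings as A writes them (proof-side only)
def pvDateParts (e : String) : List String :=
  [e, PySem.Str.slice e (some (-2)) none, PySem.Str.slice e none (some (-4)),
   PySem.Str.join "" [PySem.Str.slice e none (some (-4)), PySem.Str.slice e (some (-2)) none],
   PySem.Str.slice e (some (-4)) none]

theorem pv_find?_filter (l : List (String × String)) (k k' : String) (h : ¬ k' = k) :
    List.find? (fun p => p.1 == k') (l.filter (fun p => !(p.1 == k)))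
    = List.find? (fun p => p.1 == k') l := by
  induction l with
  | nil => rfl
  | cons p t ih =>
    by_cases hq : p.1 = k'
    · simp [hq, h]
    · by_cases hp : p.1 = k
      · rw [List.filter_cons_of_neg (by simp [hp]), List.find?_cons_of_neg (by simp [hq]), ih]
      · rw [List.filter_cons_of_pos (by simp [hp]), List.find?_cons_of_neg (by simp [hq]),
            List.find?_cons_of_neg (by simp [hq]), ih]

-- erasing one key does not change lookups of a different key
theorem pv_get?_erase_ne (d : PySem.Dict String String) (k k' : String) (h : ¬ k' = k) :
    (PySem.Dict.erase d k).get? k' = d.get? k' := by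
  simp only [PySem.Dict.erase, PySem.Dict.get?]
  rw [pv_find?_filter _ _ _ h]

-- the invariant of A's loop: over keys with distinct names, with the copy and the
-- mutated dict both still answering each pending key with its value, the loop appends
-- the cleaned non-"none" values and the date parts of the "day" keys
theorem pv_loop (copy : PySem.Dict String String)
    (l : List (String × String))
    (d : PySem.Dict String String) (base dates : List String)
    (hnl : (l.map Prod.fst).Nodup)
    (hcopy : ∀ p ∈ l, copy.get? p.1 = some p.2)
    (hd : ∀ p ∈ l, d.get? p.1 = some p.2) :
    ((l.map Prod.fst).foldl
      (fun (st : PySem.Dict String String × List String × List String) key =>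
        if PySem.Dict.getD copy key "" == "none" then
          (PySem.Dict.erase st.1 key, st.2.1, st.2.2)
        else
          let element :=
            PySem.Str.replace (PySem.Str.replace (PySem.Str.replace
              (PySem.Dict.getD st.1 key "") "." "") " " "") "/" ""
          if PySem.Str.isIn "day" key then
            (st.1, st.2.1 ++ [element],
                st.2.2 ++ [element, PySem.Str.slice element (some (-2)) none,
                  PySem.Str.slice element none (some (-4)),
                  PySem.Str.join "" [PySem.Str.slice element none (some (-4)),
                    PySem.Str.slice element (some (-2)) none],
                  PySem.Str.slice element (some (-4)) none])
          else
            (st.1, st.2.1 ++ [element], st.2.2))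
      (d, base, dates)).2
    = (base ++ (l.filter (fun p => !(p.2 == "none"))).map (fun p => pvClean p.2),
       dates ++ (l.filter (fun p => !(p.2 == "none"))).flatMap
         (fun p => if PySem.Str.isIn "day" p.1 then pvDateParts (pvClean p.2) else [])) := by
  induction l generalizing d base dates with
  | nil => simp
  | cons p t ih =>
    have hp : copy.get? p.1 = some p.2 := hcopy p (List.mem_cons_self ..)
    have hdp : d.get? p.1 = some p.2 := hd p (List.mem_cons_self ..)
    rw [List.map_cons, List.nodup_cons] at hnl
    have hpt : p.1 ∉ t.map Prod.fst := hnl.1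
    have hnt : (t.map Prod.fst).Nodup := hnl.2
    have hct : ∀ q ∈ t, copy.get? q.1 = some q.2 := fun q hq => hcopy q (List.mem_cons_of_mem _ hq)
    simp only [List.map_cons, List.foldl_cons,
      PySem.Dict.getD_of_get?_eq_some _ _ hp, PySem.Dict.getD_of_get?_eq_some _ _ hdp]
    by_cases hv : p.2 = "none"
    · have hdt : ∀ q ∈ t, (PySem.Dict.erase d p.1).get? q.1 = some q.2 := by
        intro q hq
        have hne : ¬ q.1 = p.1 := fun h => hpt (h ▸ List.mem_map_of_mem hq)
        rw [pv_get?_erase_ne _ _ _ hne]; exact hd q (List.mem_cons_of_mem _ hq)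
      simp only [hv, beq_self_eq_true, if_true]
      rw [ih _ _ _ hnt hct hdt]
      simp [hv]
    · have hdt : ∀ q ∈ t, d.get? q.1 = some q.2 := fun q hq => hd q (List.mem_cons_of_mem _ hq)
      have hv' : (p.2 == "none") = false := by simp [hv]
      simp only [hv', Bool.false_eq_true, if_false]
      by_cases hday : PySem.Str.isIn "day" p.1 = true
      · have hday' : PySem.Chars.isIn ['d','a','y'] p.1.toList = true := hday
        simp only [hday, if_true]
        rw [ih _ _ _ hnt hct hdt]
        simp [hv', hday', pvClean, pvDateParts]
      · have hday' : PySem.Chars.isIn ['d','a','y'] p.1.toList = false := eq_false_of_ne_true hday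
        simp only [eq_false_of_ne_true hday, Bool.false_eq_true, if_false]
        rw [ih _ _ _ hnt hct hdt]
        simp [hv', hday', pvClean]

-- erasing a list of keys filters the items by key membership
theorem pv_foldl_erase_items (ks : List String) (d : PySem.Dict String String) :
    (ks.foldl (fun d k => PySem.Dict.erase d k) d).items
    = d.items.filter (fun p => !(ks.contains p.1)) := by
  induction ks generalizing d with
  | nil => simp
  | cons k t ih =>
    rw [List.foldl_cons, ih]
    show ((PySem.Dict.erase d k).items).filter _ = _
    simp only [PySem.Dict.erase, List.filter_filter]
    apply List.filter_congr
    intro p _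
    by_cases h : p.1 = k <;> simp [h]

-- under distinct keys, deleting the keys of the "none" entries keeps exactly the others
theorem pv_remaining (full : List (String × String)) (hnd : (full.map Prod.fst).Nodup) :
    ((((full.filter (fun p => p.2 == "none")).map Prod.fst).foldl
        (fun d k => PySem.Dict.erase d k) (PySem.Dict.mk full)).items)
    = full.filter (fun p => !(p.2 == "none")) := by
  rw [pv_foldl_erase_items]
  have hmk : (PySem.Dict.mk full).items = full := rfl
  rw [hmk]
  apply List.filter_congr
  intro p hp
  by_cases hv : p.2 = "none"
  · have : p.1 ∈ (full.filter (fun p => p.2 == "none")).map Prod.fst :=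
      List.mem_map_of_mem (List.mem_filter.mpr ⟨hp, by simp [hv]⟩)
    simp [hv, this]
  · have hmem : p.1 ∉ (full.filter (fun p => p.2 == "none")).map Prod.fst := by
      intro hmem
      obtain ⟨q, hq, hq1⟩ := List.mem_map.mp hmem
      have hqf := List.mem_filter.mp hq
      have hqp : q = p := List.inj_on_of_nodup_map hnd hqf.1 hp hq1
      rw [hqp] at hqf
      exact hv (by simpa using hqf.2)
    simp [hv, hmem]

-- replacing one character by the empty string is a filter
theorem pv_rep_go (c : Char) (l acc : List Char) (fuel : Nat) (h : l.length ≤ fuel) :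
    PySem.Chars.replace.go [c] [] fuel l acc
    = acc.reverse ++ l.filter (fun x => !(x == c)) := by
  induction l generalizing fuel acc with
  | nil => cases fuel <;> simp [PySem.Chars.replace.go]
  | cons x t ih =>
    cases fuel with
    | zero => simp at h
    | succ n =>
      simp only [PySem.Chars.replace.go]
      by_cases hx : x = c
      · have hpre : List.isPrefixOf [c] (x :: t) = true := by simp [hx, List.isPrefixOf]
        rw [if_pos hpre]
        simp only [List.length_cons] at h
        show PySem.Chars.replace.go [c] [] n t acc = _
        rw [ih _ _ (by omega)]
        simp [hx]
      · have hpre : List.isPrefixOf [c] (x :: t) = false := by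
          simp [List.isPrefixOf]; exact fun hh => hx hh.symm
        rw [if_neg (by simp [hpre])]
        simp only [List.length_cons] at h
        rw [ih _ _ (by omega)]
        simp [hx]

theorem pv_replace_single (cs : List Char) (c : Char) :
    PySem.Chars.replace cs [c] [] = cs.filter (fun x => !(x == c)) := by
  rw [PySem.Chars.replace]
  simp only [List.isEmpty_cons, Bool.false_eq_true, if_false]
  simpa using pv_rep_go c cs [] cs.length le_rfl

-- B's one-pass deletion equals A's three chained replaces
theorem pv_clean_eq (s : String) : pvBClean s = pvClean s := by
  apply String.toList_inj.mp
  simp only [pvBClean, pvClean, String.toList_ofList, PySem.Str.toList_replace]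
  have h1 : (".":String).toList = ['.'] := rfl
  have h2 : (" ":String).toList = [' '] := rfl
  have h3 : ("/":String).toList = ['/'] := rfl
  have h0 : ("":String).toList = [] := rfl
  rw [h1, h2, h3, h0, pv_replace_single, pv_replace_single, pv_replace_single,
      List.filter_filter, List.filter_filter]
  apply List.filter_congr
  intro c _
  by_cases a : c = '.' <;> by_cases b : c = ' ' <;> by_cases d : c = '/' <;>
    simp [a, b, d, Bool.and_comm, Bool.and_left_comm, Bool.and_assoc]

-- the last two of the 4-char tail are the last two of the whole string
theorem pv_year_slice (e : String) :
    PySem.Str.slice (PySem.Str.slice e (some (-4)) none) (some (-2)) none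
    = PySem.Str.slice e (some (-2)) none := by
  apply String.toList_inj.mp
  simp only [PySem.Str.toList_slice, PySem.Chars.slice_eq_listSlice]
  rw [PySem.List.slice_from_neg_ofNat _ 4 (by omega),
      PySem.List.slice_from_neg_ofNat _ 2 (by omega),
      PySem.List.slice_from_neg_ofNat _ 2 (by omega)]
  rw [List.drop_drop, List.length_drop]
  congr 1
  omega

-- B's date parts are A's
theorem pv_date_eq (e : String) : pvBDate e = pvDateParts e := by
  simp only [pvBDate, pvDateParts, pv_year_slice]

-- the recursive descent computes the map and the flatMap
theorem pv_go_eq (l : List (String × String)) :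
    pvGo l = (l.map (fun p => pvClean p.2),
      l.flatMap (fun p => if PySem.Str.isIn "day" p.1 then pvDateParts (pvClean p.2) else [])) := by
  induction l with
  | nil => rfl
  | cons p t ih =>
    obtain ⟨k, v⟩ := p
    simp only [pvGo, ih, pv_clean_eq, pv_date_eq, List.map_cons, List.flatMap_cons]
    by_cases h : PySem.Str.isIn "day" k = true
    · have h' : PySem.Chars.isIn ['d','a','y'] k.toList = true := h
      simp [h']
    · have h' : PySem.Chars.isIn ['d','a','y'] k.toList = false := eq_false_of_ne_true h
      simp [h']

-- ===== VERDICT (by name: the statement is the Claim_ definition above) =====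
theorem string_filtering_spec : Claim_equal_string_filtering := by
  intro si _ hnd
  simp only [Spec_string_filtering, string_filtering, string_filtering_alt]
  have hkeys : PySem.Dict.keys (PySem.Dict.mk si) = si.map Prod.fst := rfl
  have hget : ∀ p ∈ si, (PySem.Dict.mk si).get? p.1 = some p.2 := by
    intro p hp
    exact PySem.Dict.get?_of_mem_items _ hp (by simpa [PySem.Dict.keys] using hnd)
  rw [hkeys, pv_loop (PySem.Dict.mk si) si (PySem.Dict.mk si) [] [] hnd hget hget,
      pv_remaining si hnd, pv_go_eq]
  simp
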